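-- pv_equiv track=rewrite | github.com/Aresiel/Lyrics-Api-Command | main.py | split_lyrics
-- ===== SOURCE A (Python) =====
-- def split_lyrics(lyr):
--     verses = lyr.split("\n\n")
--
--     joined_verses = []
--
--     while len(verses) > 0:
--         joined_verse = ""
--         verse_count = 0
--
--         while True:
--             v = verses[verse_count:]
--             if len(verses[verse_count:]) == 0:
--                 break
--
--             verse_to_be_added = verses[verse_count:][0]
--
--             if (len(joined_verse) + len(verse_to_be_added)) + len("\n\n") > 2048:
--                 break
--
--             joined_verse = (joined_verse + "\n\n" + verse_to_be_added).strip()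
--             verse_count = verse_count + 1
--
--         verses = verses[verse_count:]
--         joined_verses.append(joined_verse)
--
--     return joined_verses
-- ===== SOURCE B (Python) =====
-- def split_lyrics(lyr):
--     chunks = []
--     cur = ""
--     for v in lyr.split("\n\n"):
--         if len(cur) + len(v) + 2 > 2048:
--             chunks.append(cur)
--             cur = v.strip()
--         else:
--             cur = (cur + "\n\n" + v).strip()
--     chunks.append(cur)
--     return chunks
-- ===== Notes on version B (the rewrite author's own statement) =====
-- stated objective: simpler
-- what changed: B makes one pass over the verse list with a running current chunk, flushing when the next verse would overflow 2048, instead of A's nested while loops that repeatedly re-slice the remaining verse list (verses[verse_count:]).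
import Mathlib
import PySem

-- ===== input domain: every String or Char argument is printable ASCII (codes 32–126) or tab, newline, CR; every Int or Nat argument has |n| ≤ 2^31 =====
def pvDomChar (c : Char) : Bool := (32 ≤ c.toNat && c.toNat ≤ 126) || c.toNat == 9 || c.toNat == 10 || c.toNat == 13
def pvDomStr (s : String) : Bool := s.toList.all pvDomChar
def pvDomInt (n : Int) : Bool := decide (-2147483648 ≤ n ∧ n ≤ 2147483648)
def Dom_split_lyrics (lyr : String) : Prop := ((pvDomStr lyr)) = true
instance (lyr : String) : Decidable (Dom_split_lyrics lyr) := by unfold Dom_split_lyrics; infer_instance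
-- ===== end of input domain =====

-- B replaces A's nested while-loops (which re-slice the remaining verse list at every
-- step) by a single simpler pass with a running current chunk.


-- ===== PORT A =====
-- A's inner `while True`: walks verses[verse_count:] (here: structural recursion on the
-- remaining suffix), accumulating joined_verse; returns (joined_verse, verse_count).
def pvInnerA : List (List Char) → List Char → (List Char × Nat)
  | [], j => (j, 0)
  | v :: rest, j =>
    if j.length + v.length + 2 > 2048 then (j, 0)
    else
      let p := pvInnerA rest (PySem.Chars.strip (j ++ ['\n', '\n'] ++ v))
      (p.1, p.2 + 1)

-- A's outer `while len(verses) > 0`, with fuel = the initial number of verses (each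
-- outer round drops ≥ 1 verse on every input Pre_ admits; the fuel guard only totalizes).
def pvOuterA : Nat → List (List Char) → List (List Char)
  | 0, _ => []
  | _ + 1, [] => []
  | f + 1, verses =>
    let p := pvInnerA verses []
    p.1 :: pvOuterA f (verses.drop p.2)

def split_lyrics (lyr : String) : List String :=
  let verses := PySem.Chars.splitOn lyr.toList ['\n', '\n']
  (pvOuterA verses.length verses).map String.ofList

-- ===== PORT B =====
-- Source B's single for-loop: state = current chunk; flush and restart on overflow.
def pvAltGo : List (List Char) → List Char → List (List Char)
  | [], cur => [cur]
  | v :: rest, cur =>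
    if cur.length + v.length + 2 > 2048 then
      cur :: pvAltGo rest (PySem.Chars.strip v)
    else
      pvAltGo rest (PySem.Chars.strip (cur ++ ['\n', '\n'] ++ v))

def split_lyrics_alt (lyr : String) : List String :=
  (pvAltGo (PySem.Chars.splitOn lyr.toList ['\n', '\n']) []).map String.ofList

-- ===== PRECONDITION & SPEC =====
-- Pre_ excludes exactly the inputs containing a "\n\n"-separated verse longer than 2046
-- characters: on those the Python A never returns (its inner loop breaks with
-- verse_count = 0, so `verses` never shrinks and the outer while loops forever).
def Pre_split_lyrics (lyr : String) : Prop :=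
  ∀ v ∈ PySem.Chars.splitOn lyr.toList ['\n', '\n'], v.length ≤ 2046
instance (lyr : String) : Decidable (Pre_split_lyrics lyr) := by
  unfold Pre_split_lyrics; infer_instance
def pvWitness_split_lyrics : String := "hello\n\nworld\n\n  la la\n\nla"

def Spec_split_lyrics (lyr : String) (out : List String) : Prop := out = split_lyrics_alt lyr
instance (lyr : String) (out : List String) : Decidable (Spec_split_lyrics lyr out) := by unfold Spec_split_lyrics; infer_instance

-- ===== CLAIM (what is proved, stated in full; the proofs are below) =====
def Claim_equal_split_lyrics : Prop := ∀ (lyr : String), Dom_split_lyrics lyr → Pre_split_lyrics lyr → Spec_split_lyrics lyr (split_lyrics lyr)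

-- ===== LEMMAS AND PROOFS =====

lemma pv_go_ne_nil (sep : List Char) :
    ∀ (fuel : Nat) (l cur : List Char) (acc : List (List Char)),
      PySem.Chars.splitOn.go sep fuel l cur acc ≠ [] := by
  intro fuel
  induction fuel with
  | zero => intro l cur acc; simp [PySem.Chars.splitOn.go]
  | succ n ih =>
    intro l cur acc
    cases l with
    | nil => simp [PySem.Chars.splitOn.go]
    | cons c rest =>
      rw [PySem.Chars.splitOn.go]
      split
      · exact ih _ _ _
      · exact ih _ _ _

lemma pv_splitOn_ne_nil (s sep : List Char) : PySem.Chars.splitOn s sep ≠ [] :=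
  pv_go_ne_nil sep _ s [] []

lemma pv_strip_nn (v : List Char) :
    PySem.Chars.strip (['\n', '\n'] ++ v) = PySem.Chars.strip v := by
  simp [PySem.Chars.strip, PySem.Chars.lstrip, List.dropWhile, PySem.Chars.isspace]

lemma pv_outerA_nil (f : Nat) : pvOuterA f [] = [] := by
  cases f <;> rfl

-- key invariant: A's "finish the current chunk, then restart" equals B's single pass.
lemma pv_main (vs : List (List Char)) :
    ∀ (j : List Char) (f : Nat),
      (∀ v ∈ vs, v.length ≤ 2046) →
      (vs.drop (pvInnerA vs j).2).length ≤ f →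
      (pvInnerA vs j).1 :: pvOuterA f (vs.drop (pvInnerA vs j).2) = pvAltGo vs j := by
  induction vs with
  | nil => intro j f _ _; simp [pvInnerA, pvAltGo, pv_outerA_nil]
  | cons v rest ih =>
    intro j f hsmall hf
    have hv : v.length ≤ 2046 := hsmall v (by simp)
    have hrest : ∀ w ∈ rest, w.length ≤ 2046 := fun w hw => hsmall w (by simp [hw])
    have hfit : ¬ (([] : List Char).length + v.length + 2 > 2048) := by simp; omega
    by_cases hover : j.length + v.length + 2 > 2048
    · -- A closes the chunk here; B flushes and restarts with v.strip()
      have hinner : pvInnerA (v :: rest) j = (j, 0) := by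
        rw [pvInnerA]; simp [hover]
      rw [hinner] at hf ⊢
      simp only [List.drop_zero] at hf ⊢
      obtain ⟨f', rfl⟩ : ∃ f', f = f' + 1 := by
        cases f with
        | zero => simp at hf
        | succ k => exact ⟨k, rfl⟩
      rw [pvAltGo]
      simp only [if_pos hover]
      congr 1
      have hinner2 : pvInnerA (v :: rest) [] =
          ((pvInnerA rest (PySem.Chars.strip v)).1,
            (pvInnerA rest (PySem.Chars.strip v)).2 + 1) := by
        rw [pvInnerA]
        simp only [if_neg hfit]
        rw [show (([] : List Char) ++ ['\n', '\n'] ++ v) = ['\n', '\n'] ++ v from by simp,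
          pv_strip_nn]
      rw [show pvOuterA (f' + 1) (v :: rest)
            = (pvInnerA (v :: rest) []).1
              :: pvOuterA f' ((v :: rest).drop (pvInnerA (v :: rest) []).2) from rfl,
        hinner2]
      simp only [List.drop_succ_cons]
      have hlen : (rest.drop (pvInnerA rest (PySem.Chars.strip v)).2).length ≤ f' := by
        have h1 : (rest.drop (pvInnerA rest (PySem.Chars.strip v)).2).length ≤ rest.length := by
          simp [List.length_drop]
        simp at hf
        omega
      exact ih (PySem.Chars.strip v) f' hrest hlen
    · -- v joins the current chunk in both
      have hinner : pvInnerA (v :: rest) j =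
          ((pvInnerA rest (PySem.Chars.strip (j ++ ['\n', '\n'] ++ v))).1,
            (pvInnerA rest (PySem.Chars.strip (j ++ ['\n', '\n'] ++ v))).2 + 1) := by
        rw [pvInnerA]; simp only [if_neg hover]
      rw [hinner] at hf ⊢
      rw [pvAltGo]
      simp only [if_neg hover]
      simp only [List.drop_succ_cons] at hf ⊢
      exact ih (PySem.Chars.strip (j ++ ['\n', '\n'] ++ v)) f hrest hf

-- ===== VERDICT (by name: the statement is the Claim_ definition above) =====
theorem split_lyrics_spec : Claim_equal_split_lyrics := by
  intro lyr _ hpre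
  unfold Spec_split_lyrics split_lyrics split_lyrics_alt
  congr 1
  have hpre' : ∀ v ∈ PySem.Chars.splitOn lyr.toList ['\n', '\n'], v.length ≤ 2046 := hpre
  obtain ⟨v, rest, hvs⟩ :=
    List.exists_cons_of_ne_nil (pv_splitOn_ne_nil lyr.toList ['\n', '\n'])
  rw [hvs] at hpre' ⊢
  show (pvOuterA (v :: rest).length (v :: rest)).map String.ofList
      = (pvAltGo (v :: rest) []).map String.ofList
  congr 1
  have hv : v.length ≤ 2046 := hpre' v (by simp)
  have hfit : ¬ (([] : List Char).length + v.length + 2 > 2048) := by simp; omega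
  simp only [List.length_cons]
  rw [show pvOuterA (rest.length + 1) (v :: rest)
        = (pvInnerA (v :: rest) []).1
          :: pvOuterA rest.length ((v :: rest).drop (pvInnerA (v :: rest) []).2) from rfl]
  have hc1 : 1 ≤ (pvInnerA (v :: rest) []).2 := by
    rw [pvInnerA]; simp only [if_neg hfit]; omega
  have hlen : (((v :: rest).drop (pvInnerA (v :: rest) []).2)).length ≤ rest.length := by
    have h1 : ((v :: rest).drop (pvInnerA (v :: rest) []).2).length
        = (v :: rest).length - (pvInnerA (v :: rest) []).2 := List.length_drop
    simp only [List.length_cons] at h1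
    omega
  exact pv_main (v :: rest) [] rest.length hpre' hlen
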